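-- pv_equiv track=rewrite | github.com/miliar/Code_Jam_Webscraper | solutions_python/Problem_181/1453.py | calculate
-- ===== SOURCE A (Python) =====
-- alpha = ['A','B','C','D','E','F','G','H','I','J','K','L','M','N','O','P','Q','R','S','T','U','V','W','X','Y','Z']
--
-- def calculate(S):
--   ans = S[0];
--   largest = S[0]
--   for i in S[1:]:
--     if (alpha.index(largest)<=alpha.index(i)):
--       ans = i + ans
--       largest = i
--     else:
--       ans = ans + i
--   return ans
-- ===== SOURCE B (Python) =====
-- def calculate(S):
--     # A character belongs to the front part exactly when it equals the maximum
--     # of the prefix ending at it (i.e. it is a running maximum); the answer is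
--     # the front characters reversed followed by the remaining characters.
--     front = [c for i, c in enumerate(S) if c == max(S[:i + 1])]
--     back = [c for i, c in enumerate(S) if c != max(S[:i + 1])]
--     return ''.join(reversed(front)) + ''.join(back)
-- ===== Notes on version B (the rewrite author's own statement) =====
-- stated objective: alternative
-- what changed: A runs one stateful loop that prepends/appends to a growing answer string driven by a carried running-max and alpha.index lookups; B has no loop-carried state at all: it classifies each position by the closed per-position predicate c == max(S[:i+1]) (c is a prefix maximum) in two comprehensions and joins reversed(front)+back once.
-- crash fix: On the empty string A raises IndexError (S[0]) and on strings of length >= 2 containing a character outside A-Z A raises ValueError (alpha.index); B returns the normally classified string there (e.g. 'a#' -> 'a#', '' -> ''). — e.g. on calculate("a#"): A raises ValueError, B returns "a#"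
import Mathlib
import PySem

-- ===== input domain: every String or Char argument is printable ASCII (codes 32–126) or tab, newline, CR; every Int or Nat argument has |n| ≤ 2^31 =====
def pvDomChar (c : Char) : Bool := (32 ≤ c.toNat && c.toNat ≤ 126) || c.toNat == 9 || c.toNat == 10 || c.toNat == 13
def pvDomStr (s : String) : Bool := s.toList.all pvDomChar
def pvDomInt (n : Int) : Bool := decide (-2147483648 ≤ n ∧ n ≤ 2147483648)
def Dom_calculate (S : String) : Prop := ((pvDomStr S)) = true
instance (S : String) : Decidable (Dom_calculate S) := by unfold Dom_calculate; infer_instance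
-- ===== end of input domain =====

-- B replaces A's stateful prepend/append loop by a stateless per-position classification:
-- a character goes to the front exactly when it equals the maximum of its own prefix.

def alphaList : List Char :=
  ['A','B','C','D','E','F','G','H','I','J','K','L','M',
   'N','O','P','Q','R','S','T','U','V','W','X','Y','Z']

-- ===== PORT A =====
-- literal port of A; alpha.index is PySem.List.index?; its none case (Python ValueError)
-- is outside Pre_calculate, .getD 0 there is arbitrary; S empty (IndexError) is outside Pre_ too
def calcStepA (st : List Char × Char) (i : Char) : List Char × Char :=
  if (PySem.List.index? alphaList st.2).getD 0 ≤ (PySem.List.index? alphaList i).getD 0 then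
    (i :: st.1, i)
  else
    (st.1 ++ [i], st.2)

def calculate (S : String) : String :=
  match S.toList with
  | [] => ""  -- S[0] raises IndexError in Python; excluded by Pre_calculate
  | c :: rest => String.ofList (rest.foldl calcStepA ([c], c)).1

-- ===== PORT B =====
-- 'c == max(S[:i+1])' of Source B: max is PySem.List.max? with identity key, S[:i+1] is PySem.List.slice
def bCond (l : List Char) (p : Int × Char) : Bool :=
  PySem.List.max? (PySem.List.slice l none (some (p.1 + 1))) (fun c => c) == some p.2

def calculate_alt (S : String) : String :=
  let l := S.toList
  let front := ((PySem.List.enumerate l).filter (fun p => bCond l p)).map (·.2)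
  let back := ((PySem.List.enumerate l).filter (fun p => !(bCond l p))).map (·.2)
  String.ofList (front.reverse ++ back)

-- ===== PRECONDITION & SPEC =====
-- Pre_ excludes exactly the inputs where A raises: the empty string (IndexError on S[0]) and
-- strings of length ≥ 2 with a character outside A–Z (ValueError from alpha.index).
def Pre_calculate (S : String) : Prop :=
  S.toList ≠ [] ∧ (1 < S.toList.length → S.toList.all (fun c => alphaList.contains c) = true)
instance (S : String) : Decidable (Pre_calculate S) := by unfold Pre_calculate; infer_instance

def pvWitness_calculate : String := "CABA"

-- On the empty string A raises IndexError, and on strings of length ≥ 2 with a character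
-- outside A–Z A raises ValueError; B returns the normally classified string there.
def Raises_calculate (S : String) : Prop :=
  S.toList = [] ∨ (1 < S.toList.length ∧ ¬ (S.toList.all (fun c => alphaList.contains c) = true))
instance (S : String) : Decidable (Raises_calculate S) := by unfold Raises_calculate; infer_instance

def pvRaiseWitness_calculate : String := "a#"
def pvRaiseWitnessOut_calculate : String := "a#"

def Spec_calculate (S : String) (out : String) : Prop := out = calculate_alt S
instance (S : String) (out : String) : Decidable (Spec_calculate S out) := by unfold Spec_calculate; infer_instance

-- ===== CLAIM (what is proved, stated in full; the proofs are below) =====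
def Claim_equal_calculate : Prop := ∀ (S : String), Dom_calculate S → Pre_calculate S → Spec_calculate S (calculate S)
def Claim_raises_calculate : Prop := (∀ (S : String), Dom_calculate S → Raises_calculate S → ¬ Pre_calculate S) ∧ (Dom_calculate (pvRaiseWitness_calculate) ∧ Raises_calculate (pvRaiseWitness_calculate) ∧ calculate_alt (pvRaiseWitness_calculate) = pvRaiseWitnessOut_calculate)

-- ===== LEMMAS AND PROOFS =====

-- the two buckets of B's classification, as functions of the whole list
def bFront (l : List Char) : List Char :=
  ((PySem.List.enumerate l).filter (fun p => bCond l p)).map (·.2)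
def bBack (l : List Char) : List Char :=
  ((PySem.List.enumerate l).filter (fun p => !(bCond l p))).map (·.2)

-- on A–Z the alpha.index comparison is exactly character order
lemma idx_le_iff (a b : Char) (ha : a ∈ alphaList) (hb : b ∈ alphaList) :
    ((PySem.List.index? alphaList a).getD 0 ≤ (PySem.List.index? alphaList b).getD 0) ↔ a ≤ b := by
  fin_cases ha <;> fin_cases hb <;> decide

lemma bCond_single (c : Char) : bCond [c] (0, c) = true := by
  simp [bCond, PySem.List.slice_to, PySem.List.max?]

lemma bFront_single (c : Char) : bFront [c] = [c] := by
  simp [bFront, PySem.List.enumerate_cons, PySem.List.enumerate_nil, bCond_single]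

lemma bBack_single (c : Char) : bBack [c] = [] := by
  simp [bBack, PySem.List.enumerate_cons, PySem.List.enumerate_nil, bCond_single]

-- appending a character does not change the classification of earlier positions
lemma bCond_append_old (l : List Char) (i : Char) (p : Int × Char)
    (hp : p ∈ PySem.List.enumerate l 0) : bCond (l ++ [i]) p = bCond l p := by
  rcases (PySem.List.mem_enumerate_iff _ _ _).mp hp with ⟨k, hk, rfl⟩
  have hcast : (0 : Int) + (k : Int) + 1 = ((k + 1 : Nat) : Int) := by push_cast; ring
  simp only [bCond, hcast, PySem.List.slice_to_natCast]
  rw [List.take_append_of_le_length (by omega)]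

-- the appended character is a prefix maximum iff it dominates the running max so far
lemma bCond_append_new (c : Char) (t : List Char) (i : Char) :
    bCond ((c :: t) ++ [i]) (((c :: t).length : Int), i)
      = decide (t.foldl max c ≤ i) := by
  have hcast : ((c :: t).length : Int) + 1 = (((c :: t).length + 1 : Nat) : Int) := by push_cast; ring
  simp only [bCond, hcast, PySem.List.slice_to_natCast]
  rw [List.take_of_length_le (by simp)]
  have : (c :: t) ++ [i] = c :: (t ++ [i]) := by simp
  rw [this, PySem.List.max?_id_cons, List.foldl_append]
  simp only [List.foldl_cons, List.foldl_nil]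
  by_cases h : t.foldl max c ≤ i
  · simp [h]
  · have : max (t.foldl max c) i ≠ i := by
      rw [max_eq_left ((not_le.mp h).le)]; intro he; exact h (le_of_eq he)
    simp [this, h]

lemma bFront_append (c : Char) (t : List Char) (i : Char) :
    bFront ((c :: t) ++ [i])
      = bFront (c :: t) ++ (if t.foldl max c ≤ i then [i] else []) := by
  unfold bFront
  rw [PySem.List.enumerate_append, List.filter_append, List.map_append]
  congr 1
  · congr 1
    exact List.filter_congr (fun p hp => bCond_append_old (c :: t) i p hp)
  · simp only [PySem.List.enumerate_cons, PySem.List.enumerate_nil, zero_add,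
      List.filter_cons, List.filter_nil]
    rw [bCond_append_new]
    by_cases h : t.foldl max c ≤ i <;> simp [h]

lemma bBack_append (c : Char) (t : List Char) (i : Char) :
    bBack ((c :: t) ++ [i])
      = bBack (c :: t) ++ (if t.foldl max c ≤ i then [] else [i]) := by
  unfold bBack
  rw [PySem.List.enumerate_append, List.filter_append, List.map_append]
  congr 1
  · congr 1
    exact List.filter_congr (fun p hp => by rw [bCond_append_old (c :: t) i p hp])
  · simp only [PySem.List.enumerate_cons, PySem.List.enumerate_nil, zero_add,
      List.filter_cons, List.filter_nil]
    rw [bCond_append_new]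
    by_cases h : t.foldl max c ≤ i <;> simp [h]

-- A's loop computes exactly B's classification (reversed front ++ back) plus the running max
lemma loopA (c : Char) (rest : List Char) :
    (∀ x ∈ c :: rest, x ∈ alphaList) →
    rest.foldl calcStepA ([c], c)
      = ((bFront (c :: rest)).reverse ++ bBack (c :: rest), rest.foldl max c) := by
  induction rest using List.reverseRecOn with
  | nil => intro _; simp [bFront_single, bBack_single]
  | append_singleton t i ih =>
    intro hmem
    have hmt : ∀ x ∈ c :: t, x ∈ alphaList := by
      intro x hx
      apply hmem
      simp at hx ⊢
      tauto
    have hi : i ∈ alphaList := hmem i (by simp)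
    have hm : t.foldl max c ∈ alphaList := by
      rcases PySem.List.foldl_max_mem t c with h | h
      · rw [h]; exact hmt c (by simp)
      · exact hmt _ (List.mem_cons_of_mem _ h)
    rw [List.foldl_append, ih hmt]
    have hl : c :: (t ++ [i]) = (c :: t) ++ [i] := by simp
    rw [List.foldl_append, hl, bFront_append, bBack_append]
    simp only [calcStepA, List.foldl_cons, List.foldl_nil]
    by_cases h : t.foldl max c ≤ i
    · rw [if_pos ((idx_le_iff _ _ hm hi).mpr h), if_pos h, if_pos h]
      simp [max_eq_right h]
    · rw [if_neg (fun hc => h ((idx_le_iff _ _ hm hi).mp hc)), if_neg h, if_neg h]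
      simp [max_eq_left ((not_le.mp h).le)]

-- ===== VERDICT (by name: the statement is the Claim_ definition above) =====
theorem calculate_spec : Claim_equal_calculate := by
  intro S _ hpre
  rcases hpre with ⟨hne, hall⟩
  unfold Spec_calculate
  cases hS : S.toList with
  | nil => exact absurd hS hne
  | cons c rest =>
    have hA : calculate S = String.ofList (rest.foldl calcStepA ([c], c)).1 := by
      unfold calculate; rw [hS]
    have hB : calculate_alt S
        = String.ofList ((bFront (c :: rest)).reverse ++ bBack (c :: rest)) := by
      unfold calculate_alt bFront bBack; rw [hS]
    rw [hA, hB]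
    cases rest with
    | nil => simp [bFront_single, bBack_single]
    | cons d rest' =>
      have hlen : 1 < S.toList.length := by simp [hS]
      have hmem' := hall hlen
      rw [hS] at hmem'
      have hmem : ∀ y ∈ (c :: d :: rest'), y ∈ alphaList := by
        intro x hx
        have := List.all_eq_true.mp hmem' x hx
        simpa using this
      rw [loopA c (d :: rest') hmem]

@[simp]
theorem calculate_raises : Claim_raises_calculate := by
  unfold Claim_raises_calculate
  constructor
  · intro S _ hr hp
    rcases hr with hr | hr
    · exact hp.1 hr
    · exact hr.2 (hp.2 hr.1)
  · refine ⟨by decide, by decide, by decide⟩
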